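-- pv_equiv track=rewrite | github.com/aquaosrs/advent-of-code | 2025/day3/part2/joltage.py | highlightSelectedDigits
-- ===== SOURCE A (Python) =====
-- def highlightSelectedDigits(joltageString, selectedIndices):
--     colors = [
--         "\033[92m",  # Green
--         "\033[91m",  # Red
--         "\033[93m",  # Yellow
--         "\033[94m",  # Blue
--         "\033[95m",  # Magenta
--         "\033[96m",  # Cyan
--         "\033[97m",  # White
--         "\033[38;5;99m",   # Purple
--         "\033[38;5;208m",  # Orange
--         "\033[38;5;213m",  # Pink
--         "\033[38;5;46m",   # Bright Green
--         "\033[38;5;226m",  # Bright Yellow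
--     ]
--
--     dimGray = "\033[38;5;240m"  # dark gray
--
--     highlightedString = ""
--     for i, char in enumerate(joltageString):
--         if i in selectedIndices:
--             batteryIndex = selectedIndices.index(i)
--             colorCode = colors[batteryIndex % len(colors)]
--             highlightedString += f"{colorCode}{char}\033[0m"
--         else:
--             highlightedString += f"{dimGray}{char}\033[0m"
--
--     return highlightedString
-- ===== SOURCE B (Python) =====
-- def highlightSelectedDigits(joltageString, selectedIndices):
--     colors = [
--         "\033[92m",  # Green
--         "\033[91m",  # Red
--         "\033[93m",  # Yellow
--         "\033[94m",  # Blue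
--         "\033[95m",  # Magenta
--         "\033[96m",  # Cyan
--         "\033[97m",  # White
--         "\033[38;5;99m",   # Purple
--         "\033[38;5;208m",  # Orange
--         "\033[38;5;213m",  # Pink
--         "\033[38;5;46m",   # Bright Green
--         "\033[38;5;226m",  # Bright Yellow
--     ]
--     dimGray = "\033[38;5;240m"
--     # first-occurrence color for each in-range selected position
--     firstColor = {}
--     for pos, idx in enumerate(selectedIndices):
--         if 0 <= idx < len(joltageString) and idx not in firstColor:
--             firstColor[idx] = colors[pos % len(colors)]
--     # sweep the highlighted positions left to right, emitting dim gaps between them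
--     pieces = []
--     start = 0
--     for idx in sorted(firstColor):
--         for ch in joltageString[start:idx]:
--             pieces.append(dimGray + ch + "\033[0m")
--         pieces.append(firstColor[idx] + joltageString[idx] + "\033[0m")
--         start = idx + 1
--     for ch in joltageString[start:]:
--         pieces.append(dimGray + ch + "\033[0m")
--     return "".join(pieces)
-- ===== Notes on version B (the rewrite author's own statement) =====
-- stated objective: faster
-- what changed: Instead of A's per-character loop with an 'in' membership test and a .index scan for every character, B records the first-occurrence color of each in-range selected position in a dict, sorts those positions, and assembles the output as an event sweep: dim-rendered gap segments between consecutive sorted highlighted positions, then the dim tail.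
import Mathlib
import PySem

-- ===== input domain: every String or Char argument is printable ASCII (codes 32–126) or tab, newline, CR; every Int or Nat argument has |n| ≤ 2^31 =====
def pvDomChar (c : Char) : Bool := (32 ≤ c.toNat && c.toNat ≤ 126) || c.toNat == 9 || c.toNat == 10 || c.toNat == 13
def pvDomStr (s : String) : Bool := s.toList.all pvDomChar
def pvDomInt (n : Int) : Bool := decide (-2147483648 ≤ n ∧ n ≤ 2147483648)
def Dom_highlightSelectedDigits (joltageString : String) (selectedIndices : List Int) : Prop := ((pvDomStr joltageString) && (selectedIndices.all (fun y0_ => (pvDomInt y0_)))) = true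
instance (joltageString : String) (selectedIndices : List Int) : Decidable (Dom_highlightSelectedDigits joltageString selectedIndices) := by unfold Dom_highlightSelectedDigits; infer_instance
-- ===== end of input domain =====

-- B replaces A's per-character membership/.index scans by an event sweep: it records the
-- first-occurrence color of each in-range selected position in a dict, sorts those positions,
-- and emits the output segment by segment (dim gaps between sorted highlighted positions).

-- the ANSI color constants both Pythons define verbatim
def pvColors : List String :=
  ["\x1B[92m", "\x1B[91m", "\x1B[93m", "\x1B[94m", "\x1B[95m", "\x1B[96m",
   "\x1B[97m", "\x1B[38;5;99m", "\x1B[38;5;208m", "\x1B[38;5;213m",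
   "\x1B[38;5;46m", "\x1B[38;5;226m"]
def pvDimGray : String := "\x1B[38;5;240m"
def pvReset : String := "\x1B[0m"

-- ===== PORT A =====
def highlightSelectedDigits (joltageString : String) (selectedIndices : List Int) : String :=
  (PySem.List.enumerate joltageString.toList).foldl
    (fun acc p =>
      if p.1 ∈ selectedIndices then
        let batteryIndex := (PySem.List.index? selectedIndices p.1).getD 0
        let colorCode := pvColors.getD (batteryIndex % pvColors.length) ""
        acc ++ (colorCode ++ String.ofList [p.2] ++ pvReset)
      else
        acc ++ (pvDimGray ++ String.ofList [p.2] ++ pvReset)) ""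

-- ===== PORT B =====
-- Source B's dict-building loop: first-occurrence color of each in-range selected position
def pvFirstColor (n : Int) (selectedIndices : List Int) : PySem.Dict Int String :=
  (PySem.List.enumerate selectedIndices).foldl
    (fun d p =>
      if (0 ≤ p.2 ∧ p.2 < n) ∧ d.contains p.2 = false then
        d.insert p.2 (pvColors.getD (p.1.toNat % pvColors.length) "")
      else d)
    PySem.Dict.empty

-- Source B's sweep: for idx in sorted(firstColor): dim gap, then the colored char; then the dim tail.
-- (joltageString[idx] is in range for every dict key, so the getD after pyGet? is exact.)
def highlightSelectedDigits_alt (joltageString : String) (selectedIndices : List Int) : String :=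
  let cs := joltageString.toList
  let fc := pvFirstColor (cs.length : Int) selectedIndices
  let r := (PySem.List.sorted fc.keys (fun k => k) false).foldl
    (fun (st : List String × Int) idx =>
      (st.1
        ++ (PySem.List.slice cs (some st.2) (some idx)).map
             (fun ch => pvDimGray ++ String.ofList [ch] ++ pvReset)
        ++ [fc.getD idx "" ++ String.ofList [(PySem.List.pyGet? cs idx).getD ' '] ++ pvReset],
       idx + 1))
    ([], 0)
  PySem.Str.join ""
    (r.1 ++ (PySem.List.slice cs (some r.2) none).map
              (fun ch => pvDimGray ++ String.ofList [ch] ++ pvReset))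

-- ===== PRECONDITION & SPEC =====
def Spec_highlightSelectedDigits (joltageString : String) (selectedIndices : List Int) (out : String) : Prop := out = highlightSelectedDigits_alt joltageString selectedIndices
instance (joltageString : String) (selectedIndices : List Int) (out : String) : Decidable (Spec_highlightSelectedDigits joltageString selectedIndices out) := by unfold Spec_highlightSelectedDigits; infer_instance

-- ===== CLAIM (what is proved, stated in full; the proofs are below) =====
def Claim_equal_highlightSelectedDigits : Prop := ∀ (joltageString : String) (selectedIndices : List Int), Dom_highlightSelectedDigits joltageString selectedIndices → Spec_highlightSelectedDigits joltageString selectedIndices (highlightSelectedDigits joltageString selectedIndices)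

-- ===== LEMMAS AND PROOFS =====

-- the color A assigns to string position i
def pvColorOf (sel : List Int) (i : Int) : String :=
  if i ∈ sel then
    pvColors.getD (((PySem.List.index? sel i).getD 0) % pvColors.length) ""
  else pvDimGray

-- one rendered cell of the output
def pvBlock (sel : List Int) (p : Int × Char) : String :=
  pvColorOf sel p.1 ++ String.ofList [p.2] ++ pvReset

def pvDimBlock (ch : Char) : String := pvDimGray ++ String.ofList [ch] ++ pvReset

theorem pv_join_cons (x : String) (xs : List String) :
    PySem.Str.join "" (x :: xs) = x ++ PySem.Str.join "" xs := by
  apply String.toList_inj.mp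
  cases xs with
  | nil => simp [PySem.Str.join, PySem.Chars.join_singleton, PySem.Chars.join_nil]
  | cons y ys => simp [PySem.Str.join, PySem.Chars.join_cons_cons]

theorem pv_foldl_append {α : Type} (l : List α) (f : α → String) (acc : String) :
    l.foldl (fun a x => a ++ f x) acc = acc ++ PySem.Str.join "" (l.map f) := by
  induction l generalizing acc with
  | nil => simp [PySem.Str.join, PySem.Chars.join_nil]
  | cons x l ih =>
    simp only [List.foldl_cons, List.map_cons, pv_join_cons, ih]
    rw [String.append_assoc]

-- A's output, characterized as one rendered cell per enumerated character
theorem pvA_eq (js : String) (sel : List Int) :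
    highlightSelectedDigits js sel
      = PySem.Str.join "" ((PySem.List.enumerate js.toList).map (pvBlock sel)) := by
  unfold highlightSelectedDigits
  have hfun : (fun (acc : String) (p : Int × Char) =>
      if p.1 ∈ sel then
        let batteryIndex := (PySem.List.index? sel p.1).getD 0
        let colorCode := pvColors.getD (batteryIndex % pvColors.length) ""
        acc ++ (colorCode ++ String.ofList [p.2] ++ pvReset)
      else
        acc ++ (pvDimGray ++ String.ofList [p.2] ++ pvReset))
      = fun acc p => acc ++ pvBlock sel p := by
    funext acc p
    by_cases h : p.1 ∈ sel <;> simp [pvBlock, pvColorOf, h]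
  rw [hfun, pv_foldl_append]
  rfl

-- the dict-building step of B
def pvFCStep (n : Int) (d : PySem.Dict Int String) (p : Int × Int) : PySem.Dict Int String :=
  if (0 ≤ p.2 ∧ p.2 < n) ∧ d.contains p.2 = false then
    d.insert p.2 (pvColors.getD (p.1.toNat % pvColors.length) "")
  else d

-- what the dict fold looks up to, for any start position and start dict
theorem pvFC_get (n : Int) (sel : List Int) : ∀ (s : Int), 0 ≤ s →
    ∀ (d : PySem.Dict Int String) (i : Int),
    ((PySem.List.enumerate sel s).foldl (pvFCStep n) d).get? i =
      if (d.get? i).isSome then d.get? i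
      else if 0 ≤ i ∧ i < n ∧ i ∈ sel then
        some (pvColors.getD ((s.toNat + (PySem.List.index? sel i).getD 0) % pvColors.length) "")
      else none := by
  induction sel with
  | nil =>
    intro s hs d i
    simp only [PySem.List.enumerate_nil, List.foldl_nil, List.not_mem_nil, and_false, if_false]
    cases h : d.get? i <;> simp
  | cons x sel ih =>
    intro s hs d i
    rw [PySem.List.enumerate_cons, List.foldl_cons]
    rw [ih (s+1) (by omega) (pvFCStep n d (s, x)) i]
    by_cases hxi : x = i
    · subst hxi
      by_cases hr : 0 ≤ x ∧ x < n
      · cases hd : d.get? x with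
        | some v =>
          have hc : d.contains x = true := by
            rw [PySem.Dict.contains_eq_isSome_get?, hd]; rfl
          have hstep : pvFCStep n d (s, x) = d := by
            simp [pvFCStep, hc]
          rw [hstep, hd]
          simp
        | none =>
          have hc : d.contains x = false := by
            rw [PySem.Dict.contains_eq_isSome_get?, hd]; rfl
          have hstep : pvFCStep n d (s, x)
              = d.insert x (pvColors.getD (s.toNat % pvColors.length) "") := by
            simp [pvFCStep, hr, hc]
          rw [hstep, PySem.Dict.get?_insert_self, PySem.List.index?_cons_self]
          simp [hr.1, hr.2]
      · have hstep : pvFCStep n d (s, x) = d := by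
          simp only [pvFCStep]
          rw [if_neg]; intro h; exact hr h.1
        rw [hstep]
        have : ¬ (0 ≤ x ∧ x < n ∧ x ∈ (x :: sel)) := by
          intro h; exact hr ⟨h.1, h.2.1⟩
        cases hd : d.get? x with
        | some v => simp
        | none =>
          simp only [Option.isSome_none, Bool.false_eq_true, if_false]
          rw [if_neg (fun h => hr ⟨h.1, h.2.1⟩), if_neg this]
    · have hget : (pvFCStep n d (s, x)).get? i = d.get? i := by
        unfold pvFCStep
        split
        · apply PySem.Dict.get?_insert_of_ne
          exact fun h => hxi h.symm
        · rfl
      rw [hget]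
      rw [PySem.List.index?_cons_of_ne _ (fun h => hxi h)]
      cases hd : d.get? i with
      | some v => simp
      | none =>
        simp only [Option.isSome_none, Bool.false_eq_true, if_false]
        by_cases hm : 0 ≤ i ∧ i < n ∧ i ∈ sel
        · have hmem : i ∈ x :: sel := List.mem_cons_of_mem _ hm.2.2
          rcases Option.isSome_iff_exists.mp
            ((PySem.List.index?_isSome_iff sel i).mpr hm.2.2) with ⟨k, hk⟩
          rw [hk]
          simp only [Option.map_some, Option.getD_some]
          rw [if_pos hm, if_pos (show 0 ≤ i ∧ i < n ∧ i ∈ x :: sel from ⟨hm.1, hm.2.1, hmem⟩)]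
          have hst : (s + 1).toNat + k = s.toNat + (k + 1) := by omega
          rw [hst]
        · have : ¬ (0 ≤ i ∧ i < n ∧ i ∈ x :: sel) := by
            intro h
            rcases List.mem_cons.mp h.2.2 with h' | h'
            · exact hxi h'.symm
            · exact hm ⟨h.1, h.2.1, h'⟩
          rw [if_neg this, if_neg hm]


theorem pv_foldl_step_nodup (n : Int) (l : List (Int × Int)) :
    ∀ d : PySem.Dict Int String, d.keys.Nodup → (l.foldl (pvFCStep n) d).keys.Nodup := by
  induction l with
  | nil => intro d hd; exact hd
  | cons p l ih =>
    intro d hd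
    rw [List.foldl_cons]
    apply ih
    unfold pvFCStep
    split
    · exact PySem.Dict.nodup_keys_insert _ _ _ hd
    · exact hd

theorem pvFC_nodup_keys (n : Int) (sel : List Int) :
    (pvFirstColor n sel).keys.Nodup := by
  exact pv_foldl_step_nodup n _ _ PySem.Dict.nodup_keys_empty

-- membership in the dict's keys = in-range selected position
theorem pvFC_mem_keys (n : Int) (sel : List Int) (i : Int) :
    i ∈ (pvFirstColor n sel).keys ↔ 0 ≤ i ∧ i < n ∧ i ∈ sel := by
  rw [← PySem.Dict.contains_iff_mem_keys, PySem.Dict.contains_eq_isSome_get?]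
  have h := pvFC_get n sel 0 (le_refl 0) PySem.Dict.empty i
  rw [show ((PySem.List.enumerate sel 0).foldl (pvFCStep n) PySem.Dict.empty)
        = pvFirstColor n sel from rfl] at h
  rw [h]
  simp only [PySem.Dict.get?_empty, Option.isSome_none, Bool.false_eq_true, if_false]
  split
  · next hc => simpa using hc
  · next hc => simpa using hc

-- the dict's value at an in-range selected position is A's color for it
theorem pvFC_getD (n : Int) (sel : List Int) (i : Int)
    (h : 0 ≤ i ∧ i < n ∧ i ∈ sel) :
    (pvFirstColor n sel).getD i "" = pvColorOf sel i := by
  rw [PySem.Dict.getD_eq_get?_getD]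
  have hg := pvFC_get n sel 0 (le_refl 0) PySem.Dict.empty i
  rw [show ((PySem.List.enumerate sel 0).foldl (pvFCStep n) PySem.Dict.empty)
        = pvFirstColor n sel from rfl] at hg
  rw [hg]
  simp only [PySem.Dict.get?_empty, Option.isSome_none, Bool.false_eq_true, if_false, if_pos h]
  simp [pvColorOf, h.2.2]

-- the sorted key list of the dict is exactly the increasing list of in-range selected positions
theorem pvFC_sorted_keys (cs : List Char) (sel : List Int) :
    PySem.List.sorted (pvFirstColor (cs.length : Int) sel).keys (fun k => k) false
      = (PySem.List.pyRange 0 (cs.length : Int) 1).filter (fun i => decide (i ∈ sel)) := by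
  set n : Int := (cs.length : Int)
  set L := (PySem.List.pyRange 0 n 1).filter (fun i => decide (i ∈ sel)) with hL
  have hLpair : L.Pairwise (· < ·) :=
    (PySem.List.pairwise_lt_pyRange_one 0 n).filter _
  have hLnodup : L.Nodup := hLpair.imp (fun h => ne_of_lt h)
  have hLmem : ∀ i : Int, i ∈ L ↔ 0 ≤ i ∧ i < n ∧ i ∈ sel := by
    intro i
    rw [hL, List.mem_filter, PySem.List.mem_pyRange_one]
    simp [and_assoc]
  have hperm : L.Perm (pvFirstColor n sel).keys := by
    rw [List.perm_ext_iff_of_nodup hLnodup (pvFC_nodup_keys n sel)]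
    intro i
    rw [hLmem, pvFC_mem_keys]
  exact PySem.List.sorted_eq_of_perm_of_pairwise_lt _ _ _ hperm hLpair

-- in a gap (no selected position), every cell is dim
theorem pv_gap (sel : List Int) : ∀ (xs : List Char) (s : Int),
    (∀ i : Int, s ≤ i → i < s + (xs.length : Int) → i ∉ sel) →
    (PySem.List.enumerate xs s).map (pvBlock sel) = xs.map pvDimBlock := by
  intro xs
  induction xs with
  | nil => intro s _; simp [PySem.List.enumerate_nil]
  | cons c xs ih =>
    intro s h
    rw [PySem.List.enumerate_cons, List.map_cons, List.map_cons]
    have hs : s ∉ sel := h s (le_refl s) (by simp)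
    congr 1
    · simp [pvBlock, pvDimBlock, pvColorOf, hs]
    · apply ih
      intro i h1 h2
      apply h i (by omega)
      simp only [List.length_cons] at *
      push_cast at *
      omega

-- the sweep step of B
def pvSweepStep (cs : List Char) (fc : PySem.Dict Int String)
    (st : List String × Int) (idx : Int) : List String × Int :=
  (st.1
    ++ (PySem.List.slice cs (some st.2) (some idx)).map pvDimBlock
    ++ [fc.getD idx "" ++ String.ofList [(PySem.List.pyGet? cs idx).getD ' '] ++ pvReset],
   idx + 1)

-- the sweep, from any start position, produces exactly the per-character cells
theorem pv_sweep (cs : List Char) (sel : List Int) :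
    ∀ (L : List Int) (start : Nat) (acc : List String),
    start ≤ cs.length →
    (∀ i : Int, i ∈ L ↔ (start : Int) ≤ i ∧ i < (cs.length : Int) ∧ i ∈ sel) →
    L.Pairwise (· < ·) →
    (let r := L.foldl (pvSweepStep cs (pvFirstColor (cs.length : Int) sel)) (acc, (start : Int));
     r.1 ++ (PySem.List.slice cs (some r.2) none).map pvDimBlock)
      = acc ++ (PySem.List.enumerate (cs.drop start) (start : Int)).map (pvBlock sel) := by
  intro L
  induction L with
  | nil =>
    intro start acc _ hmem _
    simp only [List.foldl_nil]
    rw [PySem.List.slice_from_natCast]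
    congr 1
    rw [pv_gap sel (cs.drop start) (start : Int)]
    intro i h1 h2 hisel
    have : i ∈ ([] : List Int) := by
      rw [hmem i]
      refine ⟨h1, ?_, hisel⟩
      simp only [List.length_drop] at h2
      omega
    simp at this
  | cons idx L' ih =>
    intro start acc hstart hmem hsort
    have hidxm : (start : Int) ≤ idx ∧ idx < (cs.length : Int) ∧ idx ∈ sel :=
      (hmem idx).mp (List.mem_cons_self)
    have hlt : ∀ j ∈ L', idx < j := (List.pairwise_cons.mp hsort).1
    set it : Nat := idx.toNat with hit
    have hidxe : idx = (it : Int) := by omega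
    have hitlt : it < cs.length := by omega
    simp only [List.foldl_cons]
    have hstep : pvSweepStep cs (pvFirstColor (cs.length : Int) sel) (acc, (start : Int)) idx
        = (acc
            ++ ((cs.drop start).take (it - start)).map pvDimBlock
            ++ [pvBlock sel ((it : Int), cs[it])],
           ((it + 1 : Nat) : Int)) := by
      unfold pvSweepStep
      simp only [hidxe]
      rw [PySem.List.slice_natCast]
      have hget : PySem.List.pyGet? cs ((it : Int)) = some cs[it] := by
        rw [PySem.List.pyGet?_natCast]
        exact List.getElem?_eq_getElem hitlt
      rw [hget]
      have hcol : (pvFirstColor (cs.length : Int) sel).getD ((it : Int)) "" = pvColorOf sel (it : Int) := by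
        apply pvFC_getD
        exact ⟨by omega, by omega, hidxe ▸ hidxm.2.2⟩
      rw [hcol]
      simp only [Prod.mk.injEq]
      exact ⟨rfl, by push_cast; ring⟩
    rw [hstep]
    rw [ih (it + 1) _ (by omega) ?hmem' (List.pairwise_cons.mp hsort).2]
    case hmem' =>
      intro i
      constructor
      · intro hi
        have h1 := (hmem i).mp (List.mem_cons_of_mem _ hi)
        have h2 := hlt i hi
        exact ⟨by omega, h1.2.1, h1.2.2⟩
      · intro hi
        have : i ∈ idx :: L' := by
          rw [hmem i]
          exact ⟨by omega, hi.2.1, hi.2.2⟩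
        rcases List.mem_cons.mp this with h | h
        · omega
        · exact h
    -- both sides are acc ++ (cells of positions start..): split the tail at it
    have hsplit : cs.drop start
        = (cs.drop start).take (it - start) ++ (cs[it] :: cs.drop (it + 1)) := by
      conv_lhs => rw [← List.take_append_drop (it - start) (cs.drop start)]
      congr 1
      rw [List.drop_drop]
      rw [show start + (it - start) = it from by omega]
      exact List.drop_eq_getElem_cons hitlt
    have hlen : ((cs.drop start).take (it - start)).length = it - start := by
      simp only [List.length_take, List.length_drop]
      omega
    conv_rhs => rw [hsplit]
    rw [PySem.List.enumerate_append, List.map_append]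
    rw [hlen]
    rw [show (start : Int) + ((it - start : Nat) : Int) = (it : Int) from by omega]
    rw [PySem.List.enumerate_cons, List.map_cons]
    rw [show (it : Int) + 1 = ((it + 1 : Nat) : Int) from by push_cast; ring]
    -- the gap cells are dim: no position in [start, it) is selected
    rw [pv_gap sel ((cs.drop start).take (it - start)) (start : Int) ?hgap]
    case hgap =>
      intro i h1 h2 hisel
      rw [hlen] at h2
      have : i ∈ idx :: L' := by
        rw [hmem i]
        exact ⟨h1, by omega, hisel⟩
      rcases List.mem_cons.mp this with h | h
      · omega
      · have := hlt i h
        omega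
    simp [List.append_assoc]

-- ===== VERDICT (by name: the statement is the Claim_ definition above) =====
theorem highlightSelectedDigits_spec : Claim_equal_highlightSelectedDigits := by
  intro js sel _
  unfold Spec_highlightSelectedDigits
  rw [pvA_eq]
  have hB : highlightSelectedDigits_alt js sel
      = (let r := (PySem.List.sorted (pvFirstColor (js.toList.length : Int) sel).keys
                    (fun k => k) false).foldl
            (pvSweepStep js.toList (pvFirstColor (js.toList.length : Int) sel)) ([], (0 : Int));
         PySem.Str.join ""
           (r.1 ++ (PySem.List.slice js.toList (some r.2) none).map pvDimBlock)) := rfl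
  rw [hB]
  dsimp only
  have hmem : ∀ i : Int,
      i ∈ PySem.List.sorted (pvFirstColor (js.toList.length : Int) sel).keys (fun k => k) false
        ↔ ((0 : Nat) : Int) ≤ i ∧ i < (js.toList.length : Int) ∧ i ∈ sel := by
    intro i
    rw [PySem.List.mem_sorted, pvFC_mem_keys]
    simp
  have hsort : (PySem.List.sorted (pvFirstColor (js.toList.length : Int) sel).keys
      (fun k => k) false).Pairwise (· < ·) := by
    rw [pvFC_sorted_keys]
    exact (PySem.List.pairwise_lt_pyRange_one 0 _).filter _
  have h := pv_sweep js.toList sel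
    (PySem.List.sorted (pvFirstColor (js.toList.length : Int) sel).keys (fun k => k) false)
    0 [] (Nat.zero_le _) hmem hsort
  simp only [Nat.cast_zero] at h
  rw [h]
  simp
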